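-- pv_equiv track=rewrite | github.com/over-engineering-run/over-engineering | nlp/src/parallel.py | split_by_segment_size
-- ===== SOURCE A (Python) =====
-- from math import ceil
--
-- def split_by_segment_size(total_size:int, seg_size: int, offset: int = 0) -> list:
--
--     """split total_size into segments by seg_size"""
--
--     # edge cases
--     if (total_size <= 0) or (seg_size <= 0):
--         return []
--
--     if total_size <= seg_size:
--         return [(0+offset, total_size+offset)]
--
--     # when total_size > batch_size
--     res_list = []
--     seg_n = ceil(total_size / seg_size)
--     for i in range (0, seg_n):
--         res_list.append((
--             (i*seg_size) + offset,
--             min((i+1)*seg_size, total_size) + offset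
--         ))
--
--     return res_list
-- ===== SOURCE B (Python) =====
-- def split_by_segment_size(total_size: int, seg_size: int, offset: int = 0) -> list:
--     """split total_size into segments by seg_size"""
--     if total_size <= 0 or seg_size <= 0:
--         return []
--     res = []
--     start = offset
--     remaining = total_size
--     while remaining > seg_size:
--         res.append((start, start + seg_size))
--         start += seg_size
--         remaining -= seg_size
--     res.append((start, start + remaining))
--     return res
-- ===== Notes on version B (the rewrite author's own statement) =====
-- stated objective: simpler
-- what changed: Replaces A's ceil-based segment count, index-multiplication and per-segment min-clipping by a while loop that peels segments off a running (start, remaining) pair, appending the final short segment after the loop, so no segment count, index arithmetic or clipping is ever computed.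
import Mathlib
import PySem

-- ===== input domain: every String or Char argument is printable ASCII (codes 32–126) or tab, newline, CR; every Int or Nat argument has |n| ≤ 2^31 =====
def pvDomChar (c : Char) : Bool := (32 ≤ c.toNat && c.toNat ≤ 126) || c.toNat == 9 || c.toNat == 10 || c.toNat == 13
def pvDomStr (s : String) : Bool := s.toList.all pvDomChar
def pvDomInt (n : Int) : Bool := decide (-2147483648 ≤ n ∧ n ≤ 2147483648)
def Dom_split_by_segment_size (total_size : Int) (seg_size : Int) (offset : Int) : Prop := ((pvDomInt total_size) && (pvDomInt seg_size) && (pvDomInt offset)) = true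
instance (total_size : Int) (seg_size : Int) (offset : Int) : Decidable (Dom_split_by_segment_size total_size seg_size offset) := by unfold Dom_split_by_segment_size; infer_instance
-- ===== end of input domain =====

-- B replaces A's ceil-count/index-multiplication loop by a while loop peeling segments off a
-- running (start, remaining) pair, with the final short segment appended after the loop (simpler).

-- ===== PORT A =====
-- math.ceil(a / b): on Dom (|ints| ≤ 2^31) Python's float division followed by ceil is exact,
-- so this exact integer ceiling (-((-a) // b)) is what A computes there.
def pvCeilDiv (a b : Int) : Int := -(PySem.Int.floordiv (-a) b)

def split_by_segment_size (total_size : Int) (seg_size : Int) (offset : Int) : List (Int × Int) :=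
  if total_size ≤ 0 ∨ seg_size ≤ 0 then []
  else if total_size ≤ seg_size then [(0 + offset, total_size + offset)]
  else
    let seg_n := pvCeilDiv total_size seg_size
    (PySem.List.pyRange 0 seg_n 1).foldl
      (fun res_list i => res_list ++ [(i * seg_size + offset, min ((i + 1) * seg_size) total_size + offset)])
      []

-- ===== PORT B =====
-- the while loop of Source B; the '0 < seg_size' conjunct is a totality guard only (the loop is
-- entered only with seg_size > 0, where it is vacuously true)
def pvSplitLoop (remaining seg_size start : Int) (res : List (Int × Int)) : List (Int × Int) :=
  if 0 < seg_size ∧ seg_size < remaining then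
    pvSplitLoop (remaining - seg_size) seg_size (start + seg_size) (res ++ [(start, start + seg_size)])
  else res ++ [(start, start + remaining)]
termination_by remaining.toNat
decreasing_by omega

def split_by_segment_size_alt (total_size : Int) (seg_size : Int) (offset : Int) : List (Int × Int) :=
  if total_size ≤ 0 ∨ seg_size ≤ 0 then []
  else pvSplitLoop total_size seg_size offset []

-- ===== PRECONDITION & SPEC =====
def Spec_split_by_segment_size (total_size : Int) (seg_size : Int) (offset : Int) (out : List (Int × Int)) : Prop := out = split_by_segment_size_alt total_size seg_size offset
instance (total_size : Int) (seg_size : Int) (offset : Int) (out : List (Int × Int)) : Decidable (Spec_split_by_segment_size total_size seg_size offset out) := by unfold Spec_split_by_segment_size; infer_instance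

-- ===== CLAIM (what is proved, stated in full; the proofs are below) =====
def Claim_equal_split_by_segment_size : Prop := ∀ (total_size : Int) (seg_size : Int) (offset : Int), Dom_split_by_segment_size total_size seg_size offset → Spec_split_by_segment_size total_size seg_size offset (split_by_segment_size total_size seg_size offset)

-- ===== LEMMAS AND PROOFS =====

theorem pv_foldl_append {α β : Type} (f : α → β) :
    ∀ (l : List α) (init : List β),
      l.foldl (fun acc i => acc ++ [f i]) init = init ++ l.map f := by
  intro l
  induction l with
  | nil => intro init; simp
  | cons x xs ih => intro init; simp [List.foldl_cons, ih]

-- For 0 < b, the exact ceiling -((-a) fdiv b) equals (a + b - 1) / b (Int ediv).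
theorem pv_ceil_eq (a b : Int) (hb : 0 < b) :
    pvCeilDiv a b = (a + b - 1) / b := by
  unfold pvCeilDiv
  have hfd : PySem.Int.floordiv (-a) b = (-a).fdiv b := by simp [PySem.Int.floordiv]
  rw [hfd, Int.fdiv_eq_ediv, if_pos (Or.inl (le_of_lt hb))]
  have hqr : b * ((-a) / b) + (-a) % b = -a := Int.mul_ediv_add_emod (-a) b
  have hr0 : 0 ≤ (-a) % b := Int.emod_nonneg _ (ne_of_gt hb)
  have hrb : (-a) % b < b := Int.emod_lt_of_pos _ hb
  set q := (-a) / b with hq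
  set r := (-a) % b with hr
  have ha : a + b - 1 = (b - 1 - r) + b * (-q) := by
    have hneg : b * (-q) = -(b * q) := by ring
    omega
  rw [ha, Int.add_mul_ediv_left _ _ (ne_of_gt hb),
    Int.ediv_eq_zero_of_lt (by omega) (by omega)]
  omega

-- Closed form of B's loop: the k-indexed segment list, by strong induction on remaining.toNat.
theorem pv_loop_eq_map (s : Int) (hs : 0 < s) :
    ∀ (n : Nat) (t o : Int) (acc : List (Int × Int)), t.toNat = n → 0 < t →
      pvSplitLoop t s o acc
        = acc ++ (List.range ((t + s - 1) / s).toNat).map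
            (fun (k : Nat) => ((k : Int) * s + o, min (((k : Int) + 1) * s) t + o)) := by
  intro n
  induction n using Nat.strong_induction_on with
  | _ n ih =>
    intro t o acc hn ht
    by_cases hle : t ≤ s
    · have hN : (t + s - 1) / s = 1 := by
        have h1 : t + s - 1 = (t - 1) + s * 1 := by ring
        rw [h1, Int.add_mul_ediv_left _ _ (ne_of_gt hs),
          Int.ediv_eq_zero_of_lt (by omega) (by omega)]
        omega
      rw [pvSplitLoop, if_neg (by omega), hN]
      simp [List.range_succ, min_eq_right hle, add_comm]
    · have hrec := ih (t - s).toNat (by omega) (t - s) (o + s)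
        (acc ++ [(o, o + s)]) rfl (by omega)
      rw [pvSplitLoop, if_pos ⟨hs, by omega⟩, hrec]
      have hN : ((t - s + s - 1) / s).toNat + 1 = ((t + s - 1) / s).toNat := by
        have h1 : t + s - 1 = (t - s + s - 1) + s * 1 := by ring
        have h2 : (t + s - 1) / s = (t - s + s - 1) / s + 1 := by
          rw [h1, Int.add_mul_ediv_left _ _ (ne_of_gt hs)]
        have h3 : 0 ≤ (t - s + s - 1) / s := Int.ediv_nonneg (by omega) (by omega)
        omega
      rw [← hN, List.range_succ_eq_map]
      simp only [List.map_cons, List.map_map, List.append_assoc, List.singleton_append]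
      congr 1
      congr 1
      · simp [min_eq_left (show s ≤ t by omega), add_comm]
      · apply List.map_congr_left
        intro k _
        simp only [Function.comp]
        push_cast
        simp only [Prod.mk.injEq]
        constructor
        · ring
        · have : min (((k : Int) + 1) * s) (t - s) + (o + s)
              = min (((k : Int) + 1 + 1) * s) t + o := by
            rcases le_total (((k : Int) + 1) * s) (t - s) with h | h
            · rw [min_eq_left h, min_eq_left (by nlinarith)]; ring
            · rw [min_eq_right h, min_eq_right (by nlinarith)]; ring
          omega

theorem split_by_segment_size_eq (total_size seg_size offset : Int) :
    split_by_segment_size total_size seg_size offset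
      = split_by_segment_size_alt total_size seg_size offset := by
  by_cases h0 : total_size ≤ 0 ∨ seg_size ≤ 0
  · rw [split_by_segment_size, split_by_segment_size_alt, if_pos h0, if_pos h0]

  · have ht : 0 < total_size := by omega
    have hs : 0 < seg_size := by omega
    rw [split_by_segment_size, split_by_segment_size_alt, if_neg h0, if_neg h0,
      pv_loop_eq_map seg_size hs total_size.toNat total_size offset [] rfl ht,
      List.nil_append]
    by_cases hle : total_size ≤ seg_size
    · rw [if_pos hle]
      have hN : (total_size + seg_size - 1) / seg_size = 1 := by
        have h1 : total_size + seg_size - 1 = (total_size - 1) + seg_size * 1 := by ring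
        rw [h1, Int.add_mul_ediv_left _ _ (ne_of_gt hs),
          Int.ediv_eq_zero_of_lt (by omega) (by omega)]
        omega
      rw [hN]
      simp [List.range_succ, min_eq_right hle]
    · rw [if_neg hle]
      have hceil : pvCeilDiv total_size seg_size = (total_size + seg_size - 1) / seg_size := by
        rw [pv_ceil_eq _ _ hs]
      rw [pv_foldl_append, PySem.List.pyRange_one, hceil]
      simp only [List.nil_append, List.map_map, sub_zero]
      apply List.map_congr_left
      intro k _
      simp [Function.comp]

-- ===== VERDICT (by name: the statement is the Claim_ definition above) =====
theorem split_by_segment_size_spec : Claim_equal_split_by_segment_size := by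
  intro t s o _
  unfold Spec_split_by_segment_size
  exact split_by_segment_size_eq t s o
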